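-- pv_equiv track=rewrite | github.com/ClopenSet/MyVHDL | a.py | cycle_index_dihedral
-- ===== SOURCE A (Python) =====
-- from math import gcd
--
-- def cycle_index_dihedral(n, k):
--     G = []
--     # 旋转对称
--     for r in range(n):
--         cycles = gcd(r, n)
--         G.append((cycles, 1))
--     # 镜像对称
--     for s in range(n):
--         if n % 2 == 0:
--             if s % 2 == 0:
--                 # 类型1镜像，有两个固定点
--                 cycles = 2 + (n - 2) // 2
--             else:
--                 # 类型2镜像，没有固定点
--                 cycles = n // 2
--         else:
--             # 奇数情况下，每个镜像都有一个固定点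
--             cycles = 1 + (n - 1) // 2
--         G.append((cycles, 1))
--     total = 0
--     for cycles, count in G:
--         total += k ** cycles
--     return total // (2 * n)
-- ===== SOURCE B (Python) =====
-- from math import gcd
--
-- def cycle_index_dihedral(n, k):
--     # Rotations via Burnside divisor formula: sum over d | n of phi(n//d) * k**d,
--     # computing only tau(n) big-integer powers instead of n of them.
--     total = 0
--     for d in range(1, n + 1):
--         if n % d == 0:
--             m = n // d
--             phi = sum(1 for x in range(m) if gcd(x, m) == 1)
--             total += phi * k ** d
--     # Reflections collapse to a closed form (two term kinds for even n, one for odd n).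
--     if n % 2 == 0:
--         h = n // 2
--         total += h * (k ** (h + 1) + k ** h)
--     else:
--         total += n * k ** ((n + 1) // 2)
--     return total // (2 * n)
-- ===== Notes on version B (the rewrite author's own statement) =====
-- stated objective: faster
-- what changed: Rotation terms are computed by the Burnside divisor formula sum_{d|n} phi(n/d)*k^d (phi counted by definition), and the n reflection terms are collapsed into a closed form, so only O(tau(n)) big-integer powers are taken instead of 2n. Pre_ restricts to the natural domain n >= 1: A raises ZeroDivisionError at n = 0, and for a negative bead count n < 0 A's value 0 is an accident of its empty loops, which B does not reproduce (B can return a float, a different value, or raise there).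
-- outside the precondition, e.g. on cycle_index_dihedral(-8, -3): A returns 0, B returns -1.0; on cycle_index_dihedral(-2, 2): A returns 0, B returns 0.0; on cycle_index_dihedral(-8, 0): A returns 0, B raises ZeroDivisionError
import Mathlib
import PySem

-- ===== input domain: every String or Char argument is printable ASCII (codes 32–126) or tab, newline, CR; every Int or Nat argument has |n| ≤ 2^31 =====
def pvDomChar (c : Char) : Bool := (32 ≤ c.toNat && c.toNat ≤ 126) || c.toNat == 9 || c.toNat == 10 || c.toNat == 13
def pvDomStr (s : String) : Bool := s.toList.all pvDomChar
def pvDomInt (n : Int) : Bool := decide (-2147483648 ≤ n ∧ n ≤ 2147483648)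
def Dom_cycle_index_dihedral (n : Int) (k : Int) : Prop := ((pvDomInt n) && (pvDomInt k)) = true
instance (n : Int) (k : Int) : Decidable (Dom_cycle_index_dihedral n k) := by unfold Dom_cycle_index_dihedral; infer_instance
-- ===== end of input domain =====

-- B replaces the n-term gcd loop for rotations by the Burnside divisor formula
-- Σ_{d∣n} φ(n/d)·k^d and collapses the n reflection terms into a closed form,
-- so only O(τ(n)) big-integer powers are taken instead of 2n (objective: faster).

-- ===== PORT A =====
def cycle_index_dihedral (n : Int) (k : Int) : Int :=
  -- G = []; for r in range(n): G.append((gcd(r, n), 1))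
  let G : List (Int × Int) :=
    (PySem.List.pyRange 0 n 1).foldl (fun G r => G ++ [((Int.gcd r n : Int), 1)]) []
  -- for s in range(n): ... G.append((cycles, 1))
  let G : List (Int × Int) :=
    (PySem.List.pyRange 0 n 1).foldl (fun G s =>
      let cycles : Int :=
        if PySem.Int.mod n 2 = 0 then
          if PySem.Int.mod s 2 = 0 then 2 + PySem.Int.floordiv (n - 2) 2
          else PySem.Int.floordiv n 2
        else 1 + PySem.Int.floordiv (n - 1) 2
      G ++ [(cycles, 1)]) G
  -- total = 0; for cycles, count in G: total += k ** cycles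
  let total : Int := G.foldl (fun total p => total + k ^ p.1.toNat) 0
  PySem.Int.floordiv total (2 * n)

-- ===== PORT B =====
-- phi = sum(1 for x in range(m) if gcd(x, m) == 1)
def pvPhi (m : Int) : Int :=
  (PySem.List.pyRange 0 m 1).foldl
    (fun acc x => if (Int.gcd x m : Int) = 1 then acc + 1 else acc) 0

def cycle_index_dihedral_alt (n : Int) (k : Int) : Int :=
  -- for d in range(1, n+1): if n % d == 0: total += phi(n//d) * k**d
  let total : Int :=
    (PySem.List.pyRange 1 (n + 1) 1).foldl
      (fun total d =>
        if PySem.Int.mod n d = 0 then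
          total + pvPhi (PySem.Int.floordiv n d) * k ^ d.toNat
        else total) 0
  -- reflections in closed form
  let total : Int :=
    if PySem.Int.mod n 2 = 0 then
      let h := PySem.Int.floordiv n 2
      total + h * (k ^ (h + 1).toNat + k ^ h.toNat)
    else
      total + n * k ^ (PySem.Int.floordiv (n + 1) 2).toNat
  PySem.Int.floordiv total (2 * n)

-- ===== PRECONDITION & SPEC =====
-- Pre_ restricts to the natural domain n ≥ 1: at n = 0 Python A raises ZeroDivisionError,
-- and for n < 0 (a negative bead count, outside the function's purpose) A's value 0 is an
-- accident of its empty loops and floor division that B does not reproduce (B can return a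
-- float there, e.g. at n = -2).
def Pre_cycle_index_dihedral (n : Int) (k : Int) : Prop := 1 ≤ n
instance (n : Int) (k : Int) : Decidable (Pre_cycle_index_dihedral n k) := by
  unfold Pre_cycle_index_dihedral; infer_instance
def pvWitness_cycle_index_dihedral : Int × Int := (6, 3)
def Spec_cycle_index_dihedral (n : Int) (k : Int) (out : Int) : Prop := out = cycle_index_dihedral_alt n k
instance (n : Int) (k : Int) (out : Int) : Decidable (Spec_cycle_index_dihedral n k out) := by unfold Spec_cycle_index_dihedral; infer_instance

-- ===== CLAIM (what is proved, stated in full; the proofs are below) =====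
def Claim_equal_cycle_index_dihedral : Prop := ∀ (n : Int) (k : Int), Dom_cycle_index_dihedral n k → Pre_cycle_index_dihedral n k → Spec_cycle_index_dihedral n k (cycle_index_dihedral n k)

-- ===== LEMMAS AND PROOFS =====

-- bridge: a mapped List.range sum is a Finset.range sum
lemma pvListRangeSum (N : Nat) (f : Nat → Int) :
    ((List.range N).map f).sum = ∑ r ∈ Finset.range N, f r := by
  induction N with
  | zero => simp
  | succ t ih => rw [List.range_succ, Finset.sum_range_succ, List.map_append, List.sum_append, ih]; simp

-- B's phi-by-counting computes Euler's totient
lemma pvPhi_natCast (m : Nat) : pvPhi (m : Int) = (Nat.totient m : Int) := by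
  unfold pvPhi
  have hfun : (fun (acc x : Int) => if (Int.gcd x (m : Int) : Int) = 1 then acc + 1 else acc)
      = fun acc x => acc + (if (Int.gcd x (m : Int) : Int) = 1 then 1 else 0) := by
    funext acc x; split <;> simp
  rw [hfun, PySem.List.foldl_add, PySem.List.pyRange_one]
  simp only [sub_zero, Int.toNat_natCast, List.map_map, zero_add]
  rw [pvListRangeSum]
  simp only [Function.comp_def]
  have hcongr : ∀ r ∈ Finset.range m,
      (if (Int.gcd (r : Int) (m : Int) : Int) = 1 then (1 : Int) else 0)
        = (if m.Coprime r then (1 : Int) else 0) := by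
    intro r _
    simp [Int.gcd_natCast_natCast, Nat.Coprime, Nat.gcd_comm, Nat.cast_eq_one]
  rw [Finset.sum_congr rfl hcongr, Finset.sum_boole, Nat.totient_eq_card_coprime]

-- Burnside rotation identity: Σ_{r<N} k^gcd(r,N) = Σ_{d∣N} φ(N/d)·k^d
lemma pvRotSum (N : Nat) (hN : 0 < N) (k : Int) :
    ∑ r ∈ Finset.range N, k ^ (Nat.gcd r N) =
    ∑ d ∈ N.divisors, (Nat.totient (N / d) : Int) * k ^ d := by
  rw [← Finset.sum_fiberwise_of_maps_to (g := fun r => Nat.gcd N r) (t := N.divisors)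
      (fun r _ => Nat.mem_divisors.mpr ⟨Nat.gcd_dvd_left _ _, hN.ne'⟩)]
  refine Finset.sum_congr rfl fun d hd => ?_
  have hdvd : d ∣ N := (Nat.mem_divisors.mp hd).1
  have hcongr : ∀ r ∈ {r ∈ Finset.range N | Nat.gcd N r = d}, k ^ (Nat.gcd r N) = k ^ d := by
    intro r hr
    obtain ⟨-, h2⟩ := Finset.mem_filter.mp hr
    rw [Nat.gcd_comm, h2]
  rw [Finset.sum_congr rfl hcongr, Finset.sum_const, ← Nat.totient_div_of_dvd hdvd,
    nsmul_eq_mul]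

-- the d ∈ range-with-divisibility sum is the divisor sum
lemma pvDivSum (N : Nat) (F : Nat → Int) :
    ∑ j ∈ Finset.range N, (if (j + 1) ∣ N then F (j + 1) else 0) =
    ∑ d ∈ N.divisors, F d := by
  have : N.divisors = Finset.filter (· ∣ N) (Finset.Ico 1 (N + 1)) := rfl
  rw [this, Finset.sum_filter, Finset.sum_Ico_eq_sum_range]
  simp [Nat.add_comm]

-- alternating reflection sum for even N = 2h
lemma pvEvenReflSum (h : Nat) (a b : Int) :
    ∑ s ∈ Finset.range (2 * h), (if s % 2 = 0 then a else b) = h * (a + b) := by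
  induction h with
  | zero => simp
  | succ t ih =>
      have h2 : 2 * (t + 1) = (2 * t) + 1 + 1 := by ring
      rw [h2, Finset.sum_range_succ, Finset.sum_range_succ, ih]
      have e1 : (2 * t) % 2 = 0 := by omega
      have e2 : (2 * t + 1) % 2 = 1 := by omega
      rw [if_pos e1, if_neg (by omega)]
      push_cast; ring

-- common normal form both ports evaluate to
def pvCommon (N : Nat) (k : Int) : Int :=
  (∑ d ∈ N.divisors, (Nat.totient (N / d) : Int) * k ^ d) +
  (if N % 2 = 0 then (N / 2 : Nat) * (k ^ (N / 2 + 1) + k ^ (N / 2))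
   else (N : Int) * k ^ ((N + 1) / 2))

lemma pvB_eq (N : Nat) (hN : 0 < N) (k : Int) :
    cycle_index_dihedral_alt (N : Int) k = PySem.Int.floordiv (pvCommon N k) (2 * (N : Int)) := by
  simp only [cycle_index_dihedral_alt]
  congr 1
  have hBfun : (fun (total d : Int) =>
        if PySem.Int.mod (N : Int) d = 0 then
          total + pvPhi (PySem.Int.floordiv (N : Int) d) * k ^ d.toNat
        else total)
      = fun total d => total +
          (if PySem.Int.mod (N : Int) d = 0 then
            pvPhi (PySem.Int.floordiv (N : Int) d) * k ^ d.toNat else 0) := by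
    funext t d; split <;> simp
  rw [hBfun, PySem.List.foldl_add, PySem.List.pyRange_one]
  have hlen : ((N : Int) + 1 - 1).toNat = N := by omega
  rw [hlen, List.map_map, pvListRangeSum]
  simp only [Function.comp_def, zero_add]
  have hterm : ∀ j ∈ Finset.range N,
      (if PySem.Int.mod (N : Int) (1 + (j : Int)) = 0 then
          pvPhi (PySem.Int.floordiv (N : Int) (1 + (j : Int))) * k ^ ((1 : Int) + (j : Int)).toNat
        else 0)
        = (if (j + 1) ∣ N then (Nat.totient (N / (j + 1)) : Int) * k ^ (j + 1) else 0) := by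
    intro j _
    have hc : (1 + (j : Int)) = ((j + 1 : Nat) : Int) := by push_cast; ring
    rw [hc, PySem.Int.mod_natCast, PySem.Int.floordiv_natCast, pvPhi_natCast]
    have hiff : (((N % (j + 1) : Nat) : Int) = 0) ↔ ((j + 1) ∣ N) := by
      rw [Nat.cast_eq_zero]
      exact Nat.dvd_iff_mod_eq_zero.symm
    simp only [Int.toNat_natCast]
    by_cases hd : (j + 1) ∣ N
    · rw [if_pos (hiff.mpr hd), if_pos hd]
    · rw [if_neg (fun h => hd (hiff.mp h)), if_neg hd]
  rw [Finset.sum_congr rfl hterm, pvDivSum N (fun d => (Nat.totient (N / d) : Int) * k ^ d)]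
  unfold pvCommon
  have hm2 : PySem.Int.mod (N : Int) 2 = ((N % 2 : Nat) : Int) := by
    exact_mod_cast PySem.Int.mod_natCast N 2
  have hd2 : PySem.Int.floordiv (N : Int) 2 = ((N / 2 : Nat) : Int) := by
    exact_mod_cast PySem.Int.floordiv_natCast N 2
  by_cases hpar : N % 2 = 0
  · rw [if_pos (by rw [hm2, hpar]; rfl), if_pos hpar, hd2]
    have e1 : (((N / 2 : Nat) : Int) + 1).toNat = N / 2 + 1 := by omega
    have e2 : (((N / 2 : Nat) : Int)).toNat = N / 2 := by omega
    rw [e1, e2]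
  · rw [if_neg (by rw [hm2]; exact_mod_cast hpar), if_neg hpar]
    have hc : ((N : Int) + 1) = ((N + 1 : Nat) : Int) := by push_cast; ring
    rw [hc]
    have hd2' : PySem.Int.floordiv (((N + 1 : Nat)) : Int) 2 = (((N + 1) / 2 : Nat) : Int) := by
      exact_mod_cast PySem.Int.floordiv_natCast (N + 1) 2
    rw [hd2']
    have e3 : ((((N + 1) / 2 : Nat)) : Int).toNat = (N + 1) / 2 := by omega
    rw [e3]

lemma pvA_eq (N : Nat) (hN : 0 < N) (k : Int) :
    cycle_index_dihedral (N : Int) k = PySem.Int.floordiv (pvCommon N k) (2 * (N : Int)) := by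
  simp only [cycle_index_dihedral]
  congr 1
  rw [PySem.List.foldl_append_singleton_eq_map, PySem.List.foldl_append_singleton_eq_map,
    List.nil_append, PySem.List.foldl_add, PySem.List.pyRange_one]
  simp only [sub_zero, Int.toNat_natCast, List.map_append, List.sum_append, List.map_map,
    zero_add, Function.comp_def]
  rw [pvListRangeSum, pvListRangeSum]
  have hm2 : PySem.Int.mod (N : Int) 2 = ((N % 2 : Nat) : Int) := by
    exact_mod_cast PySem.Int.mod_natCast N 2
  have hrot : ∀ r ∈ Finset.range N,
      k ^ (Int.gcd ((r : Int)) ((N : Int))) = k ^ (Nat.gcd r N) := by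
    intro r _
    simp [Int.gcd_natCast_natCast]
  rw [Finset.sum_congr rfl hrot, pvRotSum N hN k]
  unfold pvCommon
  congr 1
  by_cases hpar : N % 2 = 0
  · have hc2 : PySem.Int.mod (N : Int) 2 = 0 := by rw [hm2, hpar]; rfl
    obtain ⟨h, rfl⟩ : ∃ h, N = 2 * h := ⟨N / 2, by omega⟩
    have hh : 0 < h := by omega
    rw [if_pos hpar]
    have hterm : ∀ s ∈ Finset.range (2 * h),
        k ^ ((if PySem.Int.mod ((2 * h : Nat) : Int) 2 = 0 then
                if PySem.Int.mod (s : Int) 2 = 0 then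
                  2 + PySem.Int.floordiv (((2 * h : Nat) : Int) - 2) 2
                else PySem.Int.floordiv ((2 * h : Nat) : Int) 2
              else 1 + PySem.Int.floordiv (((2 * h : Nat) : Int) - 1) 2).toNat)
          = (if s % 2 = 0 then k ^ (h + 1) else k ^ h) := by
      intro s _
      rw [if_pos hc2]
      have hms : PySem.Int.mod (s : Int) 2 = ((s % 2 : Nat) : Int) := by
        exact_mod_cast PySem.Int.mod_natCast s 2
      by_cases hs : s % 2 = 0
      · rw [if_pos (by rw [hms, hs]; rfl), if_pos hs]
        have he : (2 + PySem.Int.floordiv (((2 * h : Nat) : Int) - 2) 2).toNat = h + 1 := by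
          rw [PySem.Int.floordiv_eq_ediv_of_pos (by norm_num)]
          push_cast
          omega
        rw [he]
      · rw [if_neg (by rw [hms]; exact_mod_cast hs), if_neg hs]
        have he : (PySem.Int.floordiv ((2 * h : Nat) : Int) 2).toNat = h := by
          rw [PySem.Int.floordiv_eq_ediv_of_pos (by norm_num)]
          push_cast
          omega
        rw [he]
    rw [Finset.sum_congr rfl hterm, pvEvenReflSum h (k ^ (h + 1)) (k ^ h)]
    have hdiv : 2 * h / 2 = h := by omega
    rw [hdiv]
  · have hc2 : ¬ PySem.Int.mod (N : Int) 2 = 0 := by rw [hm2]; exact_mod_cast hpar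
    rw [if_neg hpar]
    have hterm : ∀ s ∈ Finset.range N,
        k ^ ((if PySem.Int.mod ((N : Nat) : Int) 2 = 0 then
                if PySem.Int.mod (s : Int) 2 = 0 then
                  2 + PySem.Int.floordiv (((N : Nat) : Int) - 2) 2
                else PySem.Int.floordiv ((N : Nat) : Int) 2
              else 1 + PySem.Int.floordiv (((N : Nat) : Int) - 1) 2).toNat)
          = k ^ ((N + 1) / 2) := by
      intro s _
      rw [if_neg hc2]
      have he : (1 + PySem.Int.floordiv (((N : Nat) : Int) - 1) 2).toNat = (N + 1) / 2 := by
        rw [PySem.Int.floordiv_eq_ediv_of_pos (by norm_num)]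
        omega
      rw [he]
    rw [Finset.sum_congr rfl hterm, Finset.sum_const, Finset.card_range, nsmul_eq_mul]

-- ===== VERDICT (by name: the statement is the Claim_ definition above) =====
theorem cycle_index_dihedral_spec : Claim_equal_cycle_index_dihedral := by
  intro n k _ hpre
  unfold Pre_cycle_index_dihedral at hpre
  unfold Spec_cycle_index_dihedral
  obtain ⟨N, rfl⟩ : ∃ N : Nat, n = (N : Int) := ⟨n.toNat, (Int.toNat_of_nonneg (by omega)).symm⟩
  have hN : 0 < N := by exact_mod_cast hpre
  rw [pvA_eq N hN k, pvB_eq N hN k]
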